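-- pv_equiv track=rewrite | github.com/damilola-elegbede/pipedream-automation | scripts/bundle_for_pipedream_v2.py | clean_imports
-- ===== SOURCE A (Python) =====
-- def clean_imports(content: str) -> str:
--     """Remove internal imports from module content."""
--     lines = content.split('\n')
--     cleaned_lines = []
--     in_type_checking = False
--
--     for line in lines:
--         # Skip TYPE_CHECKING blocks
--         if 'TYPE_CHECKING:' in line:
--             in_type_checking = True
--             continue
--         if in_type_checking and line.strip() == '':
--             in_type_checking = False
--             continue
--
--         # Skip internal imports
--         if line.strip().startswith('from src.'):
--             continue
--         if line.strip().startswith('import src.'):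
--             continue
--
--         # Skip if we're in TYPE_CHECKING block
--         if not in_type_checking:
--             cleaned_lines.append(line)
--
--     return '\n'.join(cleaned_lines).strip()
-- ===== SOURCE B (Python) =====
-- def clean_imports(content: str) -> str:
--     """Remove internal imports from module content."""
--     lines = content.split('\n')
--     kept = []
--     i = 0
--     n = len(lines)
--     while i < n:
--         line = lines[i]
--         if 'TYPE_CHECKING:' in line:
--             # skip the block: advance past following lines up to and
--             # including the first blank one (or to EOF)
--             i += 1
--             while i < n and lines[i].strip() != '':
--                 i += 1
--             i += 1
--             continue
--         s = line.strip()
--         if not (s.startswith('from src.') or s.startswith('import src.')):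
--             kept.append(line)
--         i += 1
--     return '\n'.join(kept).strip()
-- ===== Notes on version B (the rewrite author's own statement) =====
-- stated objective: simpler
-- what changed: B drops A's persistent in_type_checking flag: an index-driven while loop consumes each TYPE_CHECKING block in one inner skip loop (up to and including the first blank line), so the per-line branch logic has no cross-line state.
import Mathlib
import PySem

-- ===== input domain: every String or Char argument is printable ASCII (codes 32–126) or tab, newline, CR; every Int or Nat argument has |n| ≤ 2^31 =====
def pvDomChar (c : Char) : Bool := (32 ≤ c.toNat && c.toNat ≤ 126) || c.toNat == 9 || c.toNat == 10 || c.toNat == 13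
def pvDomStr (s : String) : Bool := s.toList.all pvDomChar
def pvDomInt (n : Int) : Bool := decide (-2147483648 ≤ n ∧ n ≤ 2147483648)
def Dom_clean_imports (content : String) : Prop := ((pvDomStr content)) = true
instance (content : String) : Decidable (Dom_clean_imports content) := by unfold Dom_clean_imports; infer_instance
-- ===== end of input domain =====

-- B replaces A's persistent in_type_checking flag by an index-style scan with an
-- inner skip loop that consumes a whole TYPE_CHECKING block at once (objective: simpler).

-- ===== PORT A =====
-- the for-loop of A: state = in_type_checking flag; branches in A's order
def cleanLoopA : Bool → List String → List String
  | _, [] => []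
  | flag, l :: rest =>
    if PySem.Str.isIn "TYPE_CHECKING:" l then cleanLoopA true rest
    else if flag && (PySem.Str.strip l == "") then cleanLoopA false rest
    else if PySem.Str.startswith (PySem.Str.strip l) "from src." then cleanLoopA flag rest
    else if PySem.Str.startswith (PySem.Str.strip l) "import src." then cleanLoopA flag rest
    else if !flag then l :: cleanLoopA flag rest
    else cleanLoopA flag rest

def clean_imports (content : String) : String :=
  -- content.split('\n'): sep is nonempty, so split? is always some
  PySem.Str.strip (PySem.Str.join "\n"
    (cleanLoopA false ((PySem.Str.split? content "\n").getD [])))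

-- ===== PORT B =====
-- Source B's inner while loop: drop lines up to and including the first blank one
def skipBlockB : List String → List String
  | [] => []
  | l :: rest => if PySem.Str.strip l == "" then rest else skipBlockB rest

theorem skipBlockB_len_le (xs : List String) : (skipBlockB xs).length ≤ xs.length := by
  induction xs with
  | nil => simp [skipBlockB]
  | cons l rest ih =>
    simp only [skipBlockB]; split
    · simp
    · exact Nat.le_succ_of_le ih

-- Source B's outer while loop
def cleanLoopB : List String → List String
  | [] => []
  | l :: rest =>
    if PySem.Str.isIn "TYPE_CHECKING:" l then cleanLoopB (skipBlockB rest)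
    else
      let s := PySem.Str.strip l
      if PySem.Str.startswith s "from src." || PySem.Str.startswith s "import src." then
        cleanLoopB rest
      else l :: cleanLoopB rest
termination_by xs => xs.length
decreasing_by
  · exact Nat.lt_succ_of_le (skipBlockB_len_le rest)
  · simp
  · simp

def clean_imports_alt (content : String) : String :=
  PySem.Str.strip (PySem.Str.join "\n"
    (cleanLoopB ((PySem.Str.split? content "\n").getD [])))

-- ===== PRECONDITION & SPEC =====
def Spec_clean_imports (content : String) (out : String) : Prop := out = clean_imports_alt content
instance (content : String) (out : String) : Decidable (Spec_clean_imports content out) := by unfold Spec_clean_imports; infer_instance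

-- ===== CLAIM (what is proved, stated in full; the proofs are below) =====
def Claim_equal_clean_imports : Prop := ∀ (content : String), Dom_clean_imports content → Spec_clean_imports content (clean_imports content)

-- ===== LEMMAS AND PROOFS =====

-- a line containing 'TYPE_CHECKING:' contains the non-space char 'T', so it does not strip to ''
theorem strip_ne_of_isIn (l : String)
    (h : PySem.Str.isIn "TYPE_CHECKING:" l = true) :
    (PySem.Str.strip l == "") = false := by
  rw [Bool.eq_false_iff]
  intro hb
  have hs : PySem.Str.strip l = "" := by exact eq_of_beq hb
  have hlist : PySem.Chars.strip l.toList = ([] : List Char) := by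
    have := congrArg String.toList hs
    simpa [PySem.Str.strip] using this
  -- 'T' ∈ l.toList from the infix hypothesis
  obtain ⟨s, t, hst⟩ := (PySem.Str.isIn_iff_infix _ _).mp h
  have hT : 'T' ∈ l.toList := by
    rw [← hst]; simp
  -- strip = [] forces every char of l to be whitespace
  have hall : ∀ c ∈ l.toList, PySem.Chars.isspace c = true := by
    intro c hc
    have h1 : PySem.Chars.lstrip l.toList =
        List.dropWhile PySem.Chars.isspace l.toList := rfl
    have h2 : (List.dropWhile PySem.Chars.isspace
        ((List.dropWhile PySem.Chars.isspace l.toList).reverse)).reverse = [] := by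
      simpa [PySem.Chars.strip, PySem.Chars.rstrip, PySem.Chars.lstrip] using hlist
    have h3 : ∀ c ∈ (List.dropWhile PySem.Chars.isspace l.toList).reverse,
        PySem.Chars.isspace c = true := by
      rw [← List.dropWhile_eq_nil_iff]
      simpa using h2
    have h4 : ∀ c ∈ List.dropWhile PySem.Chars.isspace l.toList,
        PySem.Chars.isspace c = true := by
      intro c hc; exact h3 c (List.mem_reverse.mpr hc)
    rcases (List.takeWhile_append_dropWhile (p := PySem.Chars.isspace)
        (l := l.toList)) ▸ hc with hc'
    rcases List.mem_append.mp hc' with htk | hdr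
    · exact List.mem_takeWhile_imp htk
    · exact h4 c hdr
  have := hall 'T' hT
  simp [PySem.Chars.isspace] at this

-- the core invariant: A's flag-scan equals B's block-skipping scan
theorem loopAB (xs : List String) :
    cleanLoopA false xs = cleanLoopB xs ∧
    cleanLoopA true xs = cleanLoopB (skipBlockB xs) := by
  induction xs with
  | nil => simp [cleanLoopA, cleanLoopB, skipBlockB]
  | cons l rest ih =>
    obtain ⟨ihF, ihT⟩ := ih
    by_cases htc : PySem.Str.isIn "TYPE_CHECKING:" l = true
    · have hb : PySem.Str.strip l ≠ "" := by
        simpa using strip_ne_of_isIn l htc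
      have hskip : skipBlockB (l :: rest) = skipBlockB rest := by
        simp [skipBlockB, hb]
      simp only [] at htc
      constructor
      · rw [cleanLoopA, cleanLoopB]
        simp only [htc, if_true]
        exact ihT
      · rw [cleanLoopA, hskip]
        simp only [htc, if_true]
        exact ihT
    · rw [Bool.not_eq_true] at htc
      constructor
      · rw [cleanLoopA, cleanLoopB]
        simp only [htc, Bool.false_eq_true, if_false, Bool.false_and]
        by_cases h1 : PySem.Str.startswith (PySem.Str.strip l) "from src." = true <;>
          by_cases h2 : PySem.Str.startswith (PySem.Str.strip l) "import src." = true <;>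
            simp_all
      · rw [cleanLoopA]
        simp only [htc, Bool.false_eq_true, if_false, Bool.true_and]
        by_cases hbl : (PySem.Str.strip l == "") = true
        · have : skipBlockB (l :: rest) = rest := by simp [skipBlockB, hbl]
          rw [this]
          simp only [hbl, if_true]
          exact ihF
        · have : skipBlockB (l :: rest) = skipBlockB rest := by
            simp only [skipBlockB]
            rw [if_neg (by simpa using hbl)]
          rw [this]
          simp only [hbl, Bool.false_eq_true, if_false]
          split
          · exact ihT
          · split
            · exact ihT
            · simpa using ihT

-- ===== VERDICT (by name: the statement is the Claim_ definition above) =====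
theorem clean_imports_spec : Claim_equal_clean_imports := by
  intro content _hdom
  unfold Spec_clean_imports clean_imports clean_imports_alt
  rw [(loopAB _).1]
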